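-- pv_equiv track=rewrite | github.com/tylerbeaueregard/tmath | chemistry.py | splitnum
-- ===== SOURCE A (Python) =====
-- def splitnum(string, loc = 0, showones = 0):
--     coef = ''
--     if str(loc).lower() in ['end', '1', 'e']:
--         string = string[::-1]
--     for n in string:
--         if n.isnumeric():
--             coef += n
--         else:
--             break
--     if str(loc).lower() in ['end', '1', 'e']:
--         coef = coef[::-1]
--     if showones and coef == '':
--         coef += '1'
--     return coef
-- ===== SOURCE B (Python) =====
-- def splitnum(string, loc=0, showones=0):
--     end = str(loc).lower() in ('end', '1', 'e')
--     n = len(string)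
--     if end:
--         j = n
--         while j > 0 and string[j - 1].isnumeric():
--             j -= 1
--         coef = string[j:]
--     else:
--         i = 0
--         while i < n and string[i].isnumeric():
--             i += 1
--         coef = string[:i]
--     if showones and not coef:
--         return '1'
--     return coef
-- ===== Notes on version B (the rewrite author's own statement) =====
-- stated objective: alternative
-- what changed: B computes a boundary index (forward scan for the leading case, backward scan for the trailing case) and slices the original string, instead of A's reverse-scan-reverse with a character accumulator.
import Mathlib
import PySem

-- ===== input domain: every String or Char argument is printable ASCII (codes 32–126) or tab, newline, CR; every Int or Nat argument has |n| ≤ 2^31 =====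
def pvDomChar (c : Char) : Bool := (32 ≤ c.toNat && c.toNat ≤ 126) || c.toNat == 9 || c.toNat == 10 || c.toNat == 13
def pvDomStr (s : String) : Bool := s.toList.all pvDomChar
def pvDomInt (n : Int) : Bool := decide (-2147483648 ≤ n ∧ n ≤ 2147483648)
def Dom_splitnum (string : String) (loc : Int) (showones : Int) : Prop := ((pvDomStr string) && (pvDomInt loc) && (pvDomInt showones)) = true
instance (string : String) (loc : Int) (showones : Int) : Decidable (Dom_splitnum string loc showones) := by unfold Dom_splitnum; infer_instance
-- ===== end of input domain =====

-- B replaces A's reverse/accumulate/reverse with a boundary-index scan and a slice (objective: alternative decomposition, same O(n) cost).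


-- ===== PORT A =====
-- str(loc).lower() in ['end','1','e'] — identical test in both Pythons, shared helper
def pvLocEnd (loc : Int) : Bool :=
  (["end", "1", "e"] : List String).contains (PySem.Str.lower (PySem.Int.toStr loc))

-- A's for-loop with break: collect the numeric prefix (isnumeric = isdigit on the ASCII domain)
def pvTakeNum : List Char → List Char
  | [] => []
  | c :: rest => if PySem.Str.isdigit c then c :: pvTakeNum rest else []

def splitnum (string : String) (loc : Int) (showones : Int) : String :=
  let s := if pvLocEnd loc then string.toList.reverse else string.toList
  let coef := pvTakeNum s
  let coef := if pvLocEnd loc then coef.reverse else coef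
  let coef := if showones ≠ 0 && coef.isEmpty then coef ++ ['1'] else coef
  String.mk coef

-- ===== PORT B =====
-- B's forward while-loop: length of the numeric prefix
def pvCountNum : List Char → Nat
  | [] => 0
  | c :: rest => if PySem.Str.isdigit c then pvCountNum rest + 1 else 0

def splitnum_alt (string : String) (loc : Int) (showones : Int) : String :=
  let cs := string.toList
  let coef :=
    if pvLocEnd loc then
      -- B's backward while-loop counts the numeric suffix; j ends at length - count
      cs.drop (cs.length - pvCountNum cs.reverse)
    else
      cs.take (pvCountNum cs)
  if showones ≠ 0 && coef.isEmpty then "1" else String.mk coef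

-- ===== PRECONDITION & SPEC =====
def Spec_splitnum (string : String) (loc : Int) (showones : Int) (out : String) : Prop := out = splitnum_alt string loc showones
instance (string : String) (loc : Int) (showones : Int) (out : String) : Decidable (Spec_splitnum string loc showones out) := by unfold Spec_splitnum; infer_instance

-- ===== CLAIM (what is proved, stated in full; the proofs are below) =====
def Claim_equal_splitnum : Prop := ∀ (string : String) (loc : Int) (showones : Int), Dom_splitnum string loc showones → Spec_splitnum string loc showones (splitnum string loc showones)

-- ===== LEMMAS AND PROOFS =====

-- ===== VERDICT (by name: the statement is the Claim_ definition above) =====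
theorem pvTakeNum_eq_take (cs : List Char) : pvTakeNum cs = cs.take (pvCountNum cs) := by
  induction cs with
  | nil => rfl
  | cons c rest ih =>
    simp only [pvTakeNum, pvCountNum]
    split <;> simp [ih]

theorem pvRevTake (cs : List Char) :
    (pvTakeNum cs.reverse).reverse = cs.drop (cs.length - pvCountNum cs.reverse) := by
  rw [pvTakeNum_eq_take, List.take_reverse, List.reverse_reverse,
    ← List.length_reverse (as := cs)]

theorem pvFinish (showones : Int) (L : List Char) :
    String.mk (if showones ≠ 0 && L.isEmpty then L ++ ['1'] else L) =
      (if showones ≠ 0 && L.isEmpty then "1" else String.mk L) := by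
  by_cases hc : (showones ≠ 0 && L.isEmpty) = true
  · have hL : L = [] := by simp_all
    subst hL
    simp only [hc, if_true]
    decide
  · have h2 : ¬(¬showones = 0 ∧ L = []) := by
      rintro ⟨h1, rfl⟩
      simp_all
    simp [h2]

theorem splitnum_spec : Claim_equal_splitnum := by
  intro s loc sh _
  unfold Spec_splitnum splitnum splitnum_alt
  cases h : pvLocEnd loc
  · simp only [h, Bool.false_eq_true, if_false, pvTakeNum_eq_take]
    exact pvFinish _ _
  · simp only [h, if_true, pvRevTake]
    exact pvFinish _ _
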